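-- pv_equiv track=rewrite | github.com/zhanpeiyi0703/- | 随机.py | encode_data_with_default
-- ===== SOURCE A (Python) =====
-- def encode_data_with_default(data, default_value=0):
--     # 创建一个空字典用于保存已存在的字符串及其对应的数值
--     mapping = {}
--     # 初始化数值
--     count = 1
--     # 编码数据
--     encoded_data = []
--     for item in data:
--         # 如果字符串在字典中不存在，则将其添加到字典中，并为其分配一个新的数值
--         if item not in mapping:
--             mapping[item] = count
--             count += 1
--         # 将字符串转换为对应的数值
--         encoded_data.append(mapping.get(item, default_value))
--     return encoded_data
-- ===== SOURCE B (Python) =====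
-- def encode_data_with_default(data, default_value=0):
--     # Rank-based encoding, no dict: the code of an item is its 1-based rank
--     # among the distinct items ordered by the position of their first occurrence.
--     order = sorted(set(data), key=data.index)
--     return [order.index(item) + 1 for item in data]
-- ===== Notes on version B (the rewrite author's own statement) =====
-- stated objective: alternative
-- what changed: A's dict-with-running-counter single pass is replaced by a dict-free rank-based algorithm: sort the distinct items by the position of their first occurrence and encode each item as its 1-based rank in that order via list.index; default_value is provably dead in A and unused in B.
import Mathlib
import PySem

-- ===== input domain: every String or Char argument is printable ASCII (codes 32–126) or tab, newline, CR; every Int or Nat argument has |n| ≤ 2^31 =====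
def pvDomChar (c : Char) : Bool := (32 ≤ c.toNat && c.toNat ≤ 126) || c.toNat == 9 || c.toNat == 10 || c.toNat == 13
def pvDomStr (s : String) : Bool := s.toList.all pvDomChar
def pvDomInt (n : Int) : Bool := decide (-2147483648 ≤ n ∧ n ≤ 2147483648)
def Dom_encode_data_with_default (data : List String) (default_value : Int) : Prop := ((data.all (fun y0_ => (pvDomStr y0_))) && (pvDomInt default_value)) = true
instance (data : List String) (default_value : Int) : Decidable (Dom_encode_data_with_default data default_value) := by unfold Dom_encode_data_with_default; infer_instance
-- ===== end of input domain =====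

-- B replaces A's dict-with-running-counter single pass by a dict-free rank-based algorithm:
-- sort the distinct items by first-occurrence position and encode each item as its 1-based
-- rank via list.index; objective: alternative (not faster).


-- ===== PORT A =====
-- body of A's for-loop: state is (mapping, count, encoded_data)
def encodeStepA (default_value : Int) (st : PySem.Dict String Int × Int × List Int)
    (item : String) : PySem.Dict String Int × Int × List Int :=
  let mapping := st.1
  let count := st.2.1
  let encoded_data := st.2.2
  -- if item not in mapping: mapping[item] = count; count += 1
  let mc := if mapping.contains item = false then (mapping.insert item count, count + 1)
            else (mapping, count)
  -- encoded_data.append(mapping.get(item, default_value))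
  (mc.1, mc.2, encoded_data ++ [mc.1.getD item default_value])

def encode_data_with_default (data : List String) (default_value : Int) : List Int :=
  (data.foldl (encodeStepA default_value) (PySem.Dict.empty, 1, [])).2.2

-- ===== PORT B =====
def encode_data_with_default_alt (data : List String) (default_value : Int) : List Int :=
  -- order = sorted(set(data), key=data.index)
  -- (data.index raises on a missing element; every element of set(data) is in data,
  --  so the `.getD 0` default of the Option-valued index? is unreachable)
  let order := PySem.List.sorted (PySem.Set.ofList data)
      (fun x => (PySem.List.index? data x).getD 0) false
  -- [order.index(item) + 1 for item in data]  (item is always in order)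
  data.map (fun item => (((PySem.List.index? order item).getD 0 : Nat) : Int) + 1)

-- ===== PRECONDITION & SPEC =====
def Spec_encode_data_with_default (data : List String) (default_value : Int) (out : List Int) : Prop := out = encode_data_with_default_alt data default_value
instance (data : List String) (default_value : Int) (out : List Int) : Decidable (Spec_encode_data_with_default data default_value out) := by unfold Spec_encode_data_with_default; infer_instance

-- ===== CLAIM =====
def Claim_equal_encode_data_with_default : Prop := ∀ (data : List String) (default_value : Int), Dom_encode_data_with_default data default_value → Spec_encode_data_with_default data default_value (encode_data_with_default data default_value)

-- ===== LEMMAS AND PROOFS =====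

-- Set.update only appends: s is a prefix of Set.update s t
lemma update_append (s t : List String) : ∃ r, PySem.Set.update s t = s ++ r := by
  induction t generalizing s with
  | nil => exact ⟨[], by simp [PySem.Set.update]⟩
  | cons x t ih =>
    have hstep : PySem.Set.update s (x :: t) = PySem.Set.update (PySem.Set.add s x) t := rfl
    obtain ⟨r, hr⟩ := ih (PySem.Set.add s x)
    by_cases hx : x ∈ s
    · exact ⟨r, by rw [hstep, hr]; simp [PySem.Set.add, hx]⟩
    · exact ⟨x :: r, by rw [hstep, hr]; simp [PySem.Set.add, hx]⟩

lemma idxOf_update_of_mem (s t : List String) (x : String) (hx : x ∈ s) :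
    (PySem.Set.update s t).idxOf x = s.idxOf x := by
  obtain ⟨r, hr⟩ := update_append s t
  rw [hr, List.idxOf_append_of_mem hx]

-- invariant proof for A's loop
lemma A_loop (dv : Int) (l : List String) :
    ∀ (d : PySem.Dict String Int) (s : List String) (acc : List Int),
    d.keys = s → s.Nodup → (∀ x ∈ s, d.getD x dv = 1 + (s.idxOf x : Int)) →
    (l.foldl (encodeStepA dv) (d, ((s.length : Int) + 1), acc)).2.2
      = acc ++ l.map (fun x => 1 + (((PySem.Set.update s l).idxOf x : Nat) : Int)) := by
  induction l with
  | nil => intro d s acc _ _ _; simp [PySem.Set.update]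
  | cons x t ih =>
    intro d s acc hkeys hnd hget
    have hcontains : d.contains x = decide (x ∈ s) := by
      rw [PySem.Dict.contains_eq_decide_mem_keys, hkeys]
    have hupd : PySem.Set.update s (x :: t) = PySem.Set.update (PySem.Set.add s x) t := rfl
    by_cases hx : x ∈ s
    · -- item already seen: dict and count unchanged
      have hadd : PySem.Set.add s x = s := by simp [PySem.Set.add, hx]
      have hstep : encodeStepA dv (d, ((s.length : Int) + 1), acc) x
          = (d, ((s.length : Int) + 1), acc ++ [d.getD x dv]) := by
        simp [encodeStepA, hcontains, hx]
      rw [List.foldl_cons, hstep, ih d s _ hkeys hnd hget, hupd, hadd]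
      have hxu : (PySem.Set.update s t).idxOf x = s.idxOf x := idxOf_update_of_mem s t x hx
      simp [hget x hx, hxu]
    · -- new item: insert with code count = s.length + 1
      have hcf : d.contains x = false := by simp [hcontains, hx]
      have hadd : PySem.Set.add s x = s ++ [x] := by simp [PySem.Set.add, hx]
      have hstep : encodeStepA dv (d, ((s.length : Int) + 1), acc)
          x = (d.insert x ((s.length : Int) + 1), ((s.length : Int) + 1) + 1,
               acc ++ [(d.insert x ((s.length : Int) + 1)).getD x dv]) := by
        simp only [encodeStepA]
        rw [hcf]
        simp
      have hself : (d.insert x ((s.length : Int) + 1)).getD x dv = (s.length : Int) + 1 :=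
        PySem.Dict.getD_insert_self _ _ _ _
      have hkeys' : (d.insert x ((s.length : Int) + 1)).keys = s ++ [x] := by
        rw [PySem.Dict.keys_insert_of_not_contains _ _ hcf, hkeys]
      have hnd' : (s ++ [x]).Nodup := by
        rw [List.nodup_append]
        refine ⟨hnd, List.nodup_singleton x, ?_⟩
        intro a ha b hb h
        simp only [List.mem_singleton] at hb
        exact hx (hb ▸ h ▸ ha)
      have hget' : ∀ y ∈ s ++ [x],
          (d.insert x ((s.length : Int) + 1)).getD y dv = 1 + ((s ++ [x]).idxOf y : Int) := by
        intro y hy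
        rcases List.mem_append.mp hy with hys | hyx
        · have hne : y ≠ x := fun h => hx (h ▸ hys)
          rw [PySem.Dict.getD_insert_of_ne _ _ _ hne, hget y hys,
            List.idxOf_append_of_mem hys]
        · have hyx' : y = x := by simpa using hyx
          subst hyx'
          rw [hself, List.idxOf_append_of_notMem hx]
          simp only [List.idxOf_cons_self, Nat.add_zero]
          ring
      have ihx := ih (d.insert x ((s.length : Int) + 1)) (s ++ [x])
        (acc ++ [(d.insert x ((s.length : Int) + 1)).getD x dv]) hkeys' hnd' hget'
      have hcast : ((s ++ [x]).length : Int) + 1 = ((s.length : Int) + 1) + 1 := by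
        simp only [List.length_append, List.length_cons, List.length_nil]
        push_cast
        ring
      rw [List.foldl_cons, hstep, ← hcast, ihx, hupd, hadd]
      have hxmem : x ∈ s ++ [x] := by simp
      have hxu : (PySem.Set.update (s ++ [x]) t).idxOf x = (s ++ [x]).idxOf x :=
        idxOf_update_of_mem (s ++ [x]) t x hxmem
      have hxi : (s ++ [x]).idxOf x = s.length := by
        rw [List.idxOf_append_of_notMem hx]; simp
      rw [hself]
      simp [hxu, hxi]
      ring

-- for a member, list.index is the first-occurrence position idxOf
lemma index?_getD_of_mem (l : List String) (x : String) (hx : x ∈ l) :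
    (PySem.List.index? l x).getD 0 = l.idxOf x := by
  induction l with
  | nil => simp at hx
  | cons a t ih =>
    by_cases hax : a = x
    · subst hax; rw [PySem.List.index?_cons_self]; simp
    · have hxt : x ∈ t := by
        rcases List.mem_cons.mp hx with h | h
        · exact absurd h.symm hax
        · exact h
      rw [PySem.List.index?_cons_of_ne _ hax]
      have hsome : (PySem.List.index? t x).isSome :=
        (PySem.List.index?_isSome_iff t x).mpr hxt
      obtain ⟨k, hk⟩ := Option.isSome_iff_exists.mp hsome
      rw [hk]
      have := ih hxt
      rw [hk] at this
      simp only [Option.map_some, Option.getD_some] at this ⊢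
      rw [List.idxOf_cons_ne _ hax, this]

-- dedup is strictly increasing under first-occurrence position
lemma dedup_pairwise_idxOf (xs : List String) :
    (PySem.List.dedup xs).Pairwise (fun a b => xs.idxOf a < xs.idxOf b) := by
  induction xs using List.reverseRecOn with
  | nil => simp [PySem.List.dedup, PySem.Set.ofList]
  | append_singleton xs y ih =>
    have hded : PySem.List.dedup (xs ++ [y]) = PySem.Set.add (PySem.List.dedup xs) y := by
      simp only [PySem.List.dedup_eq_ofList, PySem.Set.ofList_eq_foldl, List.foldl_append,
        List.foldl_cons, List.foldl_nil]
    by_cases hy : y ∈ xs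
    · have hmem : y ∈ PySem.List.dedup xs := (PySem.List.mem_dedup _ _).mpr hy
      rw [hded]
      have hadd : PySem.Set.add (PySem.List.dedup xs) y = PySem.List.dedup xs := by
        simp [PySem.Set.add, hy]
      rw [hadd]
      refine List.Pairwise.imp_of_mem ?_ ih
      intro a b ha hb hab
      have ha' := (PySem.List.mem_dedup _ _).mp ha
      have hb' := (PySem.List.mem_dedup _ _).mp hb
      rwa [List.idxOf_append_of_mem ha', List.idxOf_append_of_mem hb']
    · have hmem : y ∉ PySem.List.dedup xs := fun h => hy ((PySem.List.mem_dedup _ _).mp h)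
      rw [hded]
      have hadd : PySem.Set.add (PySem.List.dedup xs) y = PySem.List.dedup xs ++ [y] := by
        simp [PySem.Set.add, hy]
      rw [hadd, List.pairwise_append]
      refine ⟨?_, List.pairwise_singleton _ _, ?_⟩
      · refine List.Pairwise.imp_of_mem ?_ ih
        intro a b ha hb hab
        have ha' := (PySem.List.mem_dedup _ _).mp ha
        have hb' := (PySem.List.mem_dedup _ _).mp hb
        rwa [List.idxOf_append_of_mem ha', List.idxOf_append_of_mem hb']
      · intro a ha b hb
        simp only [List.mem_singleton] at hb
        subst hb
        have ha' := (PySem.List.mem_dedup _ _).mp ha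
        rw [List.idxOf_append_of_mem ha', List.idxOf_append_of_notMem hy]
        have : xs.idxOf a < xs.length := List.idxOf_lt_length_of_mem ha'
        simp only [List.idxOf_cons_self, Nat.add_zero]
        omega

-- B's sort by first position reproduces first-seen order
lemma order_eq_dedup (data : List String) :
    PySem.List.sorted (PySem.Set.ofList data)
      (fun x => (PySem.List.index? data x).getD 0) false = PySem.List.dedup data := by
  apply PySem.List.sorted_eq_of_perm_of_pairwise_lt
  · rw [← PySem.List.dedup_eq_ofList]
  · refine List.Pairwise.imp_of_mem ?_ (dedup_pairwise_idxOf data)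
    intro a b ha hb hab
    have ha' := (PySem.List.mem_dedup _ _).mp ha
    have hb' := (PySem.List.mem_dedup _ _).mp hb
    rwa [index?_getD_of_mem _ _ ha', index?_getD_of_mem _ _ hb']

-- ===== VERDICT =====
theorem encode_data_with_default_spec : Claim_equal_encode_data_with_default := by
  intro data dv _
  unfold Spec_encode_data_with_default encode_data_with_default encode_data_with_default_alt
  have h0 : ((0 : Int) + 1) = 1 := by norm_num
  have hA := A_loop dv data PySem.Dict.empty [] []
    (PySem.Dict.keys_empty) (List.nodup_nil) (by intro x hx; simp at hx)
  simp only [List.length_nil, Nat.cast_zero] at hA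
  rw [h0] at hA
  rw [hA]
  have hupd : PySem.Set.update [] data = PySem.List.dedup data := by
    simp [PySem.Set.update, PySem.Set.ofList_eq_foldl]
  rw [hupd]
  simp only [List.nil_append, order_eq_dedup]
  apply List.map_congr_left
  intro x hx
  rw [index?_getD_of_mem (PySem.List.dedup data) x ((PySem.List.mem_dedup _ _).mpr hx)]
  ring
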